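-- pv_equiv track=rewrite | github.com/animeshokhade/dsa | scaler/Task Scheduling.py | solve
-- ===== SOURCE A (Python) =====
-- from collections import deque
--
-- def solve(A, B):
--     a = deque(A)
--     b = 0
--     cyc = 0
--
--     while a:
--         if a[0] != B[b]:
--             a.append(a.popleft())
--         else:
--             a.popleft()
--             b += 1
--         cyc += 1
--
--     return cyc
-- ===== SOURCE B (Python) =====
-- def solve(A, B):
--     # One iteration per target instead of per rotation: find the target's
--     # first position in the remaining ring, charge pos+1 cycles, and cut the
--     # ring there (suffix then prefix) instead of rotating one step at a time.
--     r = list(A)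
--     cyc = 0
--     b = 0
--     while r:
--         i = r.index(B[b])
--         cyc += i + 1
--         r = r[i + 1:] + r[:i]
--         b += 1
--     return cyc
-- ===== Notes on version B (the rewrite author's own statement) =====
-- stated objective: alternative
-- what changed: Replaces the per-rotation deque simulation with one iteration per target: look up the target's first index in the remaining ring, add index+1 to the count, and re-cut the list there with slices, so the element-by-element rotation disappears.
import Mathlib
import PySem

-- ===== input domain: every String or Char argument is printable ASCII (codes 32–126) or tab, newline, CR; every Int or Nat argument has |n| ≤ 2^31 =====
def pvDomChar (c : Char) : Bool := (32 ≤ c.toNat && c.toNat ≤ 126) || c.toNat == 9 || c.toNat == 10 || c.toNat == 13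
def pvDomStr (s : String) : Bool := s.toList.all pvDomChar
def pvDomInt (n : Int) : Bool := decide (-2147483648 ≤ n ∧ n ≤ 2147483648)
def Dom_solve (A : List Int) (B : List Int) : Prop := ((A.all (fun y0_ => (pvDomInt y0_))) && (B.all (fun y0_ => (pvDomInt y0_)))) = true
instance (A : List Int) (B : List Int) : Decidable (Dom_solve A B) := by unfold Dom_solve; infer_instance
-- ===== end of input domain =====

-- B replaces the per-rotation deque simulation by one iteration per target
-- (first index in the remaining ring + slice re-cut); alternative decomposition, same cost.


-- ===== PORT A =====
-- A's while loop, one fuel unit per cycle.  Where Python raises (B[b] out of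
-- range) or diverges (only there can the fuel run out) the port returns cyc;
-- both situations lie outside Pre_solve.  b only grows from 0, so Python's
-- B[b] is exactly B[b]? here.
def solveLoop (B : List Int) : List Int → Nat → Int → Nat → Int
  | [], _, cyc, _ => cyc
  | _ :: _, _, cyc, 0 => cyc
  | x :: rest, b, cyc, fuel + 1 =>
    match B[b]? with
    | none => cyc                    -- Python: IndexError
    | some t =>
      if x ≠ t then solveLoop B (rest ++ [x]) b (cyc + 1) fuel
      else solveLoop B rest (b + 1) (cyc + 1) fuel

def solve (A : List Int) (B : List Int) : Int :=
  solveLoop B A 0 0 (A.length * A.length + 1)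

-- ===== PORT B =====
-- one iteration per target: i = r.index(B[b]); cyc += i + 1; r = r[i+1:] + r[:i]
def altLoop : List Int → List Int → Int → Int
  | [], _, cyc => cyc
  | _ :: _, [], cyc => cyc           -- Python: IndexError on B[b]
  | x :: rest, t :: bs, cyc =>
    match h : PySem.List.index? (x :: rest) t with
    | none => cyc                    -- Python: ValueError from .index
    | some i =>
      altLoop ((x :: rest).drop (i + 1) ++ (x :: rest).take i) bs (cyc + ((i : Int) + 1))
termination_by r => r.length
decreasing_by
  obtain ⟨hk, -, -⟩ := PySem.List.getElem_of_index?_eq_some h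
  simp only [List.length_cons] at hk
  simp only [List.length_append, List.length_drop, List.length_take, List.length_cons]
  omega

def solve_alt (A : List Int) (B : List Int) : Int :=
  altLoop A B 0

-- ===== PRECONDITION & SPEC =====
-- Exactly the inputs on which Python A returns: the first |A| elements of B
-- must be a permutation of A; otherwise A either rotates forever (a target is
-- missing from the deque) or raises IndexError (b runs past the end of B).
def Pre_solve (A : List Int) (B : List Int) : Prop := A.Perm (B.take A.length)
instance (A : List Int) (B : List Int) : Decidable (Pre_solve A B) := by unfold Pre_solve; infer_instance

def pvWitness_solve : List Int × List Int := ([1, 2, 3, 2], [2, 1, 2, 3, 7])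

def Spec_solve (A : List Int) (B : List Int) (out : Int) : Prop := out = solve_alt A B
instance (A : List Int) (B : List Int) (out : Int) : Decidable (Spec_solve A B out) := by unfold Spec_solve; infer_instance

-- ===== CLAIM (what is proved, stated in full; the proofs are below) =====
def Claim_equal_solve : Prop := ∀ (A : List Int) (B : List Int), Dom_solve A B → Pre_solve A B → Spec_solve A B (solve A B)

-- ===== LEMMAS AND PROOFS =====

-- unfolding lemma for altLoop's inner match
lemma altLoop_cons (x t : Int) (rest bs : List Int) (cyc : Int) (i : Nat)
    (h : PySem.List.index? (x :: rest) t = some i) :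
    altLoop (x :: rest) (t :: bs) cyc
      = altLoop ((x :: rest).drop (i + 1) ++ (x :: rest).take i) bs (cyc + ((i : Int) + 1)) := by
  rw [PySem.List.index?_eq_idxOf?] at h
  rw [altLoop.eq_def]
  split <;> simp_all
  split <;> simp_all

-- one altLoop step equals i+1 solveLoop steps (i rotations + one matching pop)
lemma solveLoop_step (B : List Int) :
    ∀ (i : Nat) (r : List Int) (b : Nat) (cyc : Int) (fuel : Nat) (t : Int),
      B[b]? = some t → PySem.List.index? r t = some i → i + 1 ≤ fuel →
      solveLoop B r b cyc fuel
        = solveLoop B (r.drop (i + 1) ++ r.take i) (b + 1) (cyc + ((i : Int) + 1)) (fuel - (i + 1)) := by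
  intro i
  induction i with
  | zero =>
    intro r b cyc fuel t hB hidx hfuel
    match r, fuel with
    | x :: rest, fuel + 1 =>
      have hx : x = t := by
        obtain ⟨hk, hv, -⟩ := PySem.List.getElem_of_index?_eq_some hidx
        simpa using hv
      subst hx
      simp [solveLoop, hB]
  | succ i ih =>
    intro r b cyc fuel t hB hidx hfuel
    match r, fuel with
    | x :: rest, fuel + 1 =>
      obtain ⟨pre, suf, heq, hlen, hnot⟩ := (PySem.List.index?_eq_some_iff _ _ _).mp hidx
      match pre, heq with
      | p0 :: pre', heq =>
        have hx : x = p0 := by simpa using congrArg (List.head? ·) heq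
        have hrest : rest = pre' ++ t :: suf := by simpa using congrArg (List.tail ·) heq
        have hlen' : pre'.length = i := by simpa using hlen
        have hmem : t ∈ rest := by rw [hrest]; simp
        have hxi : PySem.List.index? rest t = some i := by
          apply (PySem.List.index?_eq_some_iff _ _ _).mpr
          exact ⟨pre', suf, hrest, hlen', fun hm => hnot (by simp [hm])⟩
        have hrot : PySem.List.index? (rest ++ [x]) t = some i := by
          rw [PySem.List.index?_append_of_mem _ hmem]; exact hxi
        have hxt : x ≠ t := by
          intro hxt; exact hnot (by simp [hx ▸ hxt])
        have hstep : solveLoop B (x :: rest) b cyc (fuel + 1)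
            = solveLoop B (rest ++ [x]) b (cyc + 1) fuel := by
          simp [solveLoop, hB, hxt]
        rw [hstep, ih (rest ++ [x]) b (cyc + 1) fuel t hB hrot (by omega)]
        have hilen : i + 1 ≤ rest.length := by rw [hrest]; simp; omega
        have hd : (rest ++ [x]).drop (i + 1) = rest.drop (i + 1) ++ [x] :=
          List.drop_append_of_le_length hilen
        have ht : (rest ++ [x]).take i = rest.take i :=
          List.take_append_of_le_length (by omega)
        have hd2 : (x :: rest).drop (i + 1 + 1) = rest.drop (i + 1) := rfl
        have ht2 : (x :: rest).take (i + 1) = x :: rest.take i := rfl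
        rw [hd, ht, hd2, ht2]
        have harith : cyc + 1 + ((i : Int) + 1) = cyc + ((i : Int) + 1 + 1) := by ring
        have hfuel2 : fuel - (i + 1) = fuel + 1 - (i + 1 + 1) := by omega
        rw [harith, hfuel2]
        simp [List.append_assoc]
    | x :: rest, 0 => omega

-- main invariant: with enough fuel and the remaining targets a permutation of
-- the remaining ring, the two loops agree
lemma main_loop (B : List Int) :
    ∀ (n : Nat) (r : List Int) (b : Nat) (cyc : Int) (fuel : Nat),
      r.length = n → n * n ≤ fuel → r.Perm ((B.drop b).take n) →
      solveLoop B r b cyc fuel = altLoop r (B.drop b) cyc := by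
  intro n
  induction n with
  | zero =>
    intro r b cyc fuel hlen _ _
    match r, hlen with
    | [], _ => simp [solveLoop, altLoop.eq_def]
  | succ n ih =>
    intro r b cyc fuel hlen hfuel hperm
    match r, hlen with
    | x :: rest, hlen =>
      have hlenr : (x :: rest).length = n + 1 := hlen
      have hlent : ((B.drop b).take (n + 1)).length = n + 1 := by
        rw [← hperm.length_eq, hlenr]
      have hBlen : n + 1 ≤ (B.drop b).length := by
        rw [List.length_take] at hlent; omega
      cases hbs : B.drop b with
      | nil => rw [hbs] at hBlen; simp at hBlen
      | cons t bs =>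
        have hB : B[b]? = some t := by
          have h1 : (List.drop b B).head? = B[b]? := List.head?_drop
          rw [hbs] at h1; simpa using h1.symm
        have hbs' : B.drop (b + 1) = bs := by
          have : B.drop (b + 1) = (B.drop b).drop 1 := by
            rw [List.drop_drop]
          rw [this, hbs]; rfl
        have hmem : t ∈ x :: rest := by
          have : t ∈ (B.drop b).take (n + 1) := by
            rw [hbs]; simp [List.take_succ_cons]
          exact hperm.mem_iff.mpr this
        obtain ⟨i, hidx⟩ := Option.isSome_iff_exists.mp
          ((PySem.List.index?_isSome_iff _ _).mpr hmem)
        obtain ⟨hk, hv, -⟩ := PySem.List.getElem_of_index?_eq_some hidx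
        have hilt : i < n + 1 := by rw [← hlenr]; exact hk
        -- decompose at the first occurrence
        obtain ⟨pre, suf, heq, hlenp, hnot⟩ := (PySem.List.index?_eq_some_iff _ _ _).mp hidx
        have hdrop : (x :: rest).drop (i + 1) = suf := by
          rw [heq, ← hlenp]
          simp
        have htake : (x :: rest).take i = pre := by
          rw [heq, ← hlenp]
          simp
        -- the new ring is a permutation of the remaining targets
        have hperm' : (suf ++ pre).Perm ((B.drop (b + 1)).take n) := by
          rw [hbs', ]
          have h1 : (x :: rest).Perm (t :: bs.take n) := by
            have : (B.drop b).take (n + 1) = t :: bs.take n := by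
              rw [hbs]; rfl
            rw [← this]; exact hperm
          have h2 : (pre ++ suf).Perm (bs.take n) := by
            have := h1.erase t
            rw [heq] at this
            have herase : (pre ++ t :: suf).erase t = pre ++ suf := by
              rw [List.erase_append_right _ (by simpa using hnot)]
              simp
            rw [herase] at this
            simpa using this
          exact (List.perm_append_comm).trans h2
        have hstep := solveLoop_step B i (x :: rest) b cyc fuel t hB hidx (by
          have := Nat.le_mul_of_pos_left (n + 1) (show 0 < n + 1 by omega)
          omega)
        rw [hstep, hdrop, htake]
        rw [altLoop_cons x t rest bs cyc i hidx, hdrop, htake]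
        have hl := congrArg List.length heq
        simp only [List.length_cons, List.length_append] at hl hlenr
        have hlennew : (suf ++ pre).length = n := by
          simp only [List.length_append]; omega
        have hfuel' : n * n ≤ fuel - (i + 1) := by
          have hexp : (n + 1) * (n + 1) = n * n + n + n + 1 := by ring
          omega
        have := ih (suf ++ pre) (b + 1) (cyc + ((i : Int) + 1)) (fuel - (i + 1))
          hlennew hfuel' hperm'
        rw [this, hbs']

theorem solve_spec_aux : ∀ (A B : List Int), Pre_solve A B → solve A B = solve_alt A B := by
  intro A B hpre
  unfold solve solve_alt
  have := main_loop B A.length A 0 0 (A.length * A.length + 1) rfl (by omega)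
    (by simpa using hpre)
  simpa using this

-- ===== VERDICT (by name: the statement is the Claim_ definition above) =====
theorem solve_spec : Claim_equal_solve := by
  intro A B _ hpre
  exact solve_spec_aux A B hpre
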